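-- pv_equiv track=rewrite | github.com/mo-hanxuan/mesh-field-smoothing | elementsBody.py | sortByClockwise
-- ===== SOURCE A (Python) =====
-- def leftIdx(lis, idx):
--     left = idx - 1
--     if left < 0:
--         left = len(lis) - 1
--     return left
--
-- def rightIdx(lis, idx):
--     right = idx + 1
--     if right > len(lis) - 1:
--         right = 0
--     return right
--
-- def sortByClockwise(lis):
--     """
--         sort a list by clockwise or counterClockwise order
--         applied for the facet nodes list
--
--         start from the smallest nodes,
--         if original direction's next node < reverse direction's next node
--             use original direction
--         else:
--             use reverse direction
--     """
--     ### find the smallest node's idx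
--     start = lis.index(min(lis))
--     res = [lis[start]]
--     if lis[rightIdx(lis, start)] < lis[leftIdx(lis, start)]:
--         cur = start
--         for i in range(len(lis) - 1):
--             res.append(lis[rightIdx(lis, cur)])
--             cur = rightIdx(lis, cur)
--     else:
--         cur = start
--         for i in range(len(lis) - 1):
--             res.append(lis[leftIdx(lis, cur)])
--             cur = leftIdx(lis, cur)
--     return res
-- ===== SOURCE B (Python) =====
-- def sortByClockwise(lis):
--     n = len(lis)
--     start = lis.index(min(lis))
--     if lis[(start + 1) % n] < lis[(start - 1) % n]:
--         return lis[start:] + lis[:start]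
--     else:
--         return lis[start::-1] + lis[:start:-1]
-- ===== Notes on version B (the rewrite author's own statement) =====
-- stated objective: simpler
-- what changed: replaces the per-step index-walking loop with its leftIdx/rightIdx helpers by one direction test via modular indexing and a single rotation (forward) or prefix/suffix reversal (backward) built from list slices
import Mathlib
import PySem

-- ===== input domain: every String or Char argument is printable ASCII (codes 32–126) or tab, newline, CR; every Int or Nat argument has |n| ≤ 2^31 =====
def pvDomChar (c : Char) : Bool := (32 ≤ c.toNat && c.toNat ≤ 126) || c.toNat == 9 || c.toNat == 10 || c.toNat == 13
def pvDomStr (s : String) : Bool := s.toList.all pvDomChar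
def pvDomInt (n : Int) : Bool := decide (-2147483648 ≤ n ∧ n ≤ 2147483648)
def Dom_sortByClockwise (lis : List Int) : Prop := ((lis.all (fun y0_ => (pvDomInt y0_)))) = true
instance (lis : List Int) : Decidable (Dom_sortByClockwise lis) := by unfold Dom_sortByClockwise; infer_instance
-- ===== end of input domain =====

-- B replaces A's per-step index-walking loop by a direction test with modular
-- indexing and a single rotation / reversal built from slices (simpler, same O(n)).

-- ===== PORT A =====
def leftIdxP (lis : List Int) (idx : Int) : Int :=
  let left := idx - 1
  if left < 0 then (lis.length : Int) - 1 else left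

def rightIdxP (lis : List Int) (idx : Int) : Int :=
  let right := idx + 1
  if right > (lis.length : Int) - 1 then 0 else right

def stepR (lis : List Int) (st : List Int × Int) (_i : Int) : List Int × Int :=
  (st.1 ++ [PySem.List.pyGetD lis (rightIdxP lis st.2) 0], rightIdxP lis st.2)

def stepL (lis : List Int) (st : List Int × Int) (_i : Int) : List Int × Int :=
  (st.1 ++ [PySem.List.pyGetD lis (leftIdxP lis st.2) 0], leftIdxP lis st.2)

def sortByClockwise (lis : List Int) : List Int :=
  match PySem.List.min? lis (fun x => x) with
  | none => []          -- min(lis) raises ValueError on []; excluded by Pre_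
  | some m =>
    match PySem.List.index? lis m with
    | none => []        -- unreachable: min is a member
    | some startN =>
      let start : Int := (startN : Int)
      let res : List Int := [PySem.List.pyGetD lis start 0]
      if PySem.List.pyGetD lis (rightIdxP lis start) 0
           < PySem.List.pyGetD lis (leftIdxP lis start) 0 then
        ((PySem.List.pyRange 0 ((lis.length : Int) - 1) 1).foldl (stepR lis) (res, start)).1
      else
        ((PySem.List.pyRange 0 ((lis.length : Int) - 1) 1).foldl (stepL lis) (res, start)).1

-- ===== PORT B =====
def sortByClockwise_alt (lis : List Int) : List Int :=
  match PySem.List.min? lis (fun x => x) with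
  | none => []          -- min(lis) raises ValueError on []; excluded by Pre_
  | some m =>
    match PySem.List.index? lis m with
    | none => []        -- unreachable: min is a member
    | some startN =>
      let start : Int := (startN : Int)
      let n : Int := (lis.length : Int)
      if PySem.List.pyGetD lis (PySem.Int.mod (start + 1) n) 0
           < PySem.List.pyGetD lis (PySem.Int.mod (start - 1) n) 0 then
        PySem.List.slice lis (some start) none ++ PySem.List.slice lis none (some start)
      else
        (PySem.List.slice? lis (some start) none (-1)).getD []
          ++ (PySem.List.slice? lis none (some start) (-1)).getD []

-- ===== PRECONDITION & SPEC =====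
-- Pre_ excludes only the empty list, on which A raises ValueError (min of an empty sequence).
def Pre_sortByClockwise (lis : List Int) : Prop := lis ≠ []
instance (lis : List Int) : Decidable (Pre_sortByClockwise lis) := by
  unfold Pre_sortByClockwise; infer_instance

def pvWitness_sortByClockwise : List Int := ([3, 1, 2, 5])

def Spec_sortByClockwise (lis : List Int) (out : List Int) : Prop := out = sortByClockwise_alt lis
instance (lis : List Int) (out : List Int) : Decidable (Spec_sortByClockwise lis out) := by
  unfold Spec_sortByClockwise; infer_instance

-- ===== CLAIM (what is proved, stated in full; the proofs are below) =====
def Claim_equal_sortByClockwise : Prop := ∀ (lis : List Int), Dom_sortByClockwise lis → Pre_sortByClockwise lis → Spec_sortByClockwise lis (sortByClockwise lis)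

-- ===== LEMMAS AND PROOFS =====

theorem rightIdxP_mod (lis : List Int) (c : Nat) (hc : c < lis.length) :
    rightIdxP lis (c : Int) = (((c + 1) % lis.length : Nat) : Int) := by
  unfold rightIdxP
  by_cases h : c + 1 = lis.length
  · have : (c + 1) % lis.length = 0 := by rw [h]; exact Nat.mod_self _
    rw [this]; simp; omega
  · have : (c + 1) % lis.length = c + 1 := Nat.mod_eq_of_lt (by omega)
    rw [this]; simp; omega

theorem leftIdxP_mod (lis : List Int) (c : Nat) (hc : c < lis.length) :
    leftIdxP lis (c : Int) = (((c + lis.length - 1) % lis.length : Nat) : Int) := by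
  unfold leftIdxP
  rcases Nat.eq_zero_or_pos c with h | h
  · subst h
    have : (0 + lis.length - 1) % lis.length = lis.length - 1 := by
      rw [Nat.zero_add]; exact Nat.mod_eq_of_lt (by omega)
    rw [this]; simp; omega
  · have h1 : c + lis.length - 1 = (c - 1) + lis.length := by omega
    have : (c + lis.length - 1) % lis.length = c - 1 := by
      rw [h1, Nat.add_mod_right]; exact Nat.mod_eq_of_lt (by omega)
    rw [this]; simp; omega

theorem pyGetD_mod (lis : List Int) (j : Nat) (hj : j < lis.length) :
    PySem.List.pyGetD lis (j : Int) 0 = lis[j] := by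
  rw [PySem.List.pyGetD_natCast, List.getD_eq_getElem _ _ hj]

theorem fwd_loop (lis : List Int) (s k : Nat) (hs : s < lis.length)
    (hk : k < lis.length) :
    (PySem.List.pyRange 0 (k : Int) 1).foldl (stepR lis)
      (((lis.rotate s).take 1), (s : Int))
      = ((lis.rotate s).take (k + 1), (((s + k) % lis.length : Nat) : Int)) := by
  induction k with
  | zero =>
    rw [PySem.List.pyRange_one_eq_nil (by omega)]
    simp [Nat.mod_eq_of_lt hs]
  | succ k ih =>
    have hk' : k < lis.length := by omega
    have hcast : ((k + 1 : Nat) : Int) = (k : Int) + 1 := by push_cast; ring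
    rw [hcast, PySem.List.pyRange_one_succ_right (by positivity), List.foldl_append,
      ih hk']
    have hc : (s + k) % lis.length < lis.length := Nat.mod_lt _ (by omega)
    simp only [List.foldl_cons, List.foldl_nil, stepR]
    rw [rightIdxP_mod lis _ hc]
    have hmods : ((s + k) % lis.length + 1) % lis.length = (s + (k + 1)) % lis.length := by
      conv_rhs => rw [show s + (k + 1) = (s + k) + 1 by ring, Nat.add_mod (s + k) 1]
      rw [Nat.add_mod ((s+k) % lis.length) 1, Nat.mod_mod_of_dvd _ dvd_rfl]
    rw [hmods]
    have hlt : (s + (k + 1)) % lis.length < lis.length := Nat.mod_lt _ (by omega)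
    rw [pyGetD_mod lis _ hlt]
    have hrlen : (lis.rotate s).length = lis.length := List.length_rotate ..
    have hkrot : k + 1 < (lis.rotate s).length := by omega
    have hel : lis[(s + (k + 1)) % lis.length] = (lis.rotate s)[k + 1] := by
      rw [List.getElem_rotate]
      congr 1
      congr 1
      omega
    rw [hel]
    have htake : (lis.rotate s).take (k + 1 + 1)
        = (lis.rotate s).take (k + 1) ++ [(lis.rotate s)[k + 1]] := by
      rw [List.take_add_one, List.getElem?_eq_getElem hkrot]
      rfl
    rw [htake]

theorem bwd_loop (lis : List Int) (s k : Nat) (hs : s < lis.length)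
    (hk : k < lis.length) :
    (PySem.List.pyRange 0 (k : Int) 1).foldl (stepL lis)
      ((((lis.rotate (s + 1)).reverse).take 1), (s : Int))
      = (((lis.rotate (s + 1)).reverse).take (k + 1),
         (((s + (lis.length - k)) % lis.length : Nat) : Int)) := by
  induction k with
  | zero =>
    rw [PySem.List.pyRange_one_eq_nil (by omega)]
    have : (s + (lis.length - 0)) % lis.length = s := by
      simp only [Nat.sub_zero, Nat.add_mod_right]
      exact Nat.mod_eq_of_lt hs
    rw [this]
    rfl
  | succ k ih =>
    have hk' : k < lis.length := by omega
    have hcast : ((k + 1 : Nat) : Int) = (k : Int) + 1 := by push_cast; ring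
    rw [hcast, PySem.List.pyRange_one_succ_right (by positivity), List.foldl_append,
      ih hk']
    have hc : (s + (lis.length - k)) % lis.length < lis.length := Nat.mod_lt _ (by omega)
    simp only [List.foldl_cons, List.foldl_nil, stepL]
    rw [leftIdxP_mod lis _ hc]
    have hmods : ((s + (lis.length - k)) % lis.length + lis.length - 1) % lis.length
        = (s + (lis.length - (k + 1))) % lis.length := by
      have h1 : (s + (lis.length - k)) % lis.length + lis.length - 1
          = (s + (lis.length - k)) % lis.length + (lis.length - 1) := by omega
      rw [h1, Nat.add_mod, Nat.mod_mod_of_dvd _ dvd_rfl, ← Nat.add_mod]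
      have h2 : s + (lis.length - k) + (lis.length - 1)
          = (s + (lis.length - (k + 1))) + lis.length := by omega
      rw [h2, Nat.add_mod_right]
    rw [hmods]
    have hlt : (s + (lis.length - (k + 1))) % lis.length < lis.length :=
      Nat.mod_lt _ (by omega)
    rw [pyGetD_mod lis _ hlt]
    have hrlen : (lis.rotate (s + 1)).length = lis.length := List.length_rotate ..
    have hkrev : k + 1 < ((lis.rotate (s + 1)).reverse).length := by
      rw [List.length_reverse, hrlen]; omega
    have hel : lis[(s + (lis.length - (k + 1))) % lis.length]
        = ((lis.rotate (s + 1)).reverse)[k + 1] := by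
      rw [List.getElem_reverse, List.getElem_rotate]
      congr 1
      rw [hrlen]
      congr 1
      omega
    rw [hel]
    have htake : ((lis.rotate (s + 1)).reverse).take (k + 1 + 1)
        = ((lis.rotate (s + 1)).reverse).take (k + 1)
          ++ [((lis.rotate (s + 1)).reverse)[k + 1]] := by
      rw [List.take_add_one, List.getElem?_eq_getElem hkrev]
      rfl
    rw [htake]

-- elements of the backward slices of B
theorem map_rev_take (lis : List Int) (s : Nat) (hs : s < lis.length) :
    (List.range (s+1)).map (fun k => lis.getD (s - k) 0) = (lis.take (s+1)).reverse := by
  apply List.ext_getElem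
  · simp; omega
  · intro i h1 h2
    simp only [List.getElem_map, List.getElem_range, List.getElem_reverse, List.getElem_take]
    rw [List.getD_eq_getElem _ _ (by omega)]
    congr 1
    simp at h2 ⊢
    omega

theorem slice_from_rev (lis : List Int) (s : Nat) (hs : s < lis.length) :
    PySem.List.slice? lis (some (s : Int)) none (-1) = some ((lis.take (s + 1)).reverse) := by
  rw [PySem.List.slice?]
  simp only [PySem.List.sliceIndices]
  norm_num
  rw [min_eq_left (by omega : (s:Int) ≤ (lis.length:Int) - 1)]
  simp only [if_neg (show ¬((s:Int) < 0) by omega)]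
  rw [if_pos (show (-1:Int) < (s:Int) by omega)]
  rw [show ((s:Int)+1).toNat = s + 1 by omega]
  rw [← map_rev_take lis s hs]
  rw [← List.filterMap_eq_map (f := fun k => lis.getD (s - k) 0)]
  apply List.filterMap_congr
  intro k hk
  have hk' : k < s + 1 := List.mem_range.mp hk
  rw [show ((s:Int) + -(k:Int)).toNat = s - k by omega]
  rw [List.getElem?_eq_getElem (by omega)]
  simp only [Function.comp_apply]
  rw [List.getD_eq_getElem _ _ (by omega)]

theorem map_rev_drop (lis : List Int) (s : Nat) (hs : s < lis.length) :
    (List.range (lis.length - 1 - s)).map (fun k => lis.getD (lis.length - 1 - k) 0)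
      = (lis.drop (s+1)).reverse := by
  apply List.ext_getElem
  · simp; omega
  · intro i h1 h2
    simp only [List.getElem_map, List.getElem_range, List.getElem_reverse, List.getElem_drop]
    rw [List.getD_eq_getElem _ _ (by omega)]
    congr 1
    simp at h2 ⊢
    omega

theorem slice_to_rev (lis : List Int) (s : Nat) (hs : s < lis.length) :
    PySem.List.slice? lis none (some (s : Int)) (-1) = some ((lis.drop (s + 1)).reverse) := by
  rw [PySem.List.slice?]
  simp only [PySem.List.sliceIndices]
  norm_num
  rw [min_eq_left (by omega : (s:Int) ≤ (lis.length:Int) - 1)]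
  simp only [if_neg (show ¬((s:Int) < 0) by omega)]
  rw [show (if (s:Int) < (lis.length:Int) - 1 then ((lis.length:Int) - 1 - (s:Int)).toNat else 0)
        = lis.length - 1 - s by split_ifs <;> omega]
  rw [← map_rev_drop lis s hs]
  rw [← List.filterMap_eq_map (f := fun k => lis.getD (lis.length - 1 - k) 0)]
  apply List.filterMap_congr
  intro k hk
  have hk' : k < lis.length - 1 - s := List.mem_range.mp hk
  rw [show ((lis.length:Int) - 1 + -(k:Int)).toNat = lis.length - 1 - k by omega]
  rw [List.getElem?_eq_getElem (by omega)]
  simp only [Function.comp_apply]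
  rw [List.getD_eq_getElem _ _ (by omega)]

theorem take_one_rotate (lis : List Int) (s : Nat) (hs : s < lis.length) :
    (lis.rotate s).take 1 = [lis[s]] := by
  apply List.ext_getElem
  · simp [List.length_rotate]; omega
  · intro i h1 h2
    have hi : i = 0 := by simp at h1; omega
    subst hi
    rw [List.getElem_take, List.getElem_rotate]
    simp [Nat.mod_eq_of_lt hs]

theorem take_one_rev_rotate (lis : List Int) (s : Nat) (hs : s < lis.length) :
    ((lis.rotate (s + 1)).reverse).take 1 = [lis[s]] := by
  apply List.ext_getElem
  · simp [List.length_rotate]; omega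
  · intro i h1 h2
    have hi : i = 0 := by simp at h1; omega
    subst hi
    rw [List.getElem_take, List.getElem_reverse, List.getElem_rotate]
    have hidx : (lis.length - 1 + (s + 1)) % lis.length = s := by
      rw [show lis.length - 1 + (s + 1) = s + lis.length by omega, Nat.add_mod_right]
      exact Nat.mod_eq_of_lt hs
    simp [hidx]

theorem cond_right (lis : List Int) (s : Nat) (hs : s < lis.length) :
    rightIdxP lis (s : Int) = PySem.Int.mod ((s : Int) + 1) (lis.length : Int) := by
  rw [rightIdxP_mod lis s hs, PySem.Int.mod_eq_emod_of_pos (by omega)]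
  rw [Int.natCast_mod]
  push_cast
  rfl

theorem cond_left (lis : List Int) (s : Nat) (hs : s < lis.length) :
    leftIdxP lis (s : Int) = PySem.Int.mod ((s : Int) - 1) (lis.length : Int) := by
  rw [leftIdxP_mod lis s hs, PySem.Int.mod_eq_emod_of_pos (by omega)]
  rw [Int.natCast_mod]
  rw [show ((s + lis.length - 1 : Nat) : Int) = ((s : Int) - 1) + 1 * (lis.length : Int) by omega]
  rw [Int.add_mul_emod_self_right]

-- ===== VERDICT (by name: the statement is the Claim_ definition above) =====
theorem sortByClockwise_spec : Claim_equal_sortByClockwise := by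
  unfold Claim_equal_sortByClockwise
  intro lis _hdom hpre
  unfold Spec_sortByClockwise
  have hn : 0 < lis.length := List.length_pos_iff.mpr hpre
  obtain ⟨m, hmin⟩ : ∃ m, PySem.List.min? lis (fun x => x) = some m := by
    cases h : PySem.List.min? lis (fun x => x) with
    | none => exact absurd ((PySem.List.min?_eq_none_iff lis (fun x => x)).mp h) hpre
    | some m => exact ⟨m, rfl⟩
  have hm : m ∈ lis := PySem.List.min?_mem hmin
  obtain ⟨s, hidx⟩ : ∃ s, PySem.List.index? lis m = some s := by
    cases h : PySem.List.index? lis m with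
    | none => exact absurd hm (by simpa using (PySem.List.index?_eq_none_iff lis m).mp h)
    | some s => exact ⟨s, rfl⟩
  obtain ⟨hs, -, -⟩ := PySem.List.getElem_of_index?_eq_some hidx
  simp only [sortByClockwise, sortByClockwise_alt, hmin, hidx]
  rw [← cond_right lis s hs, ← cond_left lis s hs]
  split_ifs with hcond
  · -- forward: rotation
    rw [pyGetD_mod lis s hs, ← take_one_rotate lis s hs]
    rw [show ((lis.length : Int) - 1) = ((lis.length - 1 : Nat) : Int) by omega]
    rw [fwd_loop lis s (lis.length - 1) hs (by omega)]
    simp only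
    rw [show lis.length - 1 + 1 = lis.length by omega]
    rw [List.take_of_length_le (by rw [List.length_rotate])]
    rw [PySem.List.slice_from_natCast, PySem.List.slice_to_natCast]
    exact List.rotate_eq_drop_append_take (by omega)
  · -- backward: reversal
    rw [pyGetD_mod lis s hs, ← take_one_rev_rotate lis s hs]
    rw [show ((lis.length : Int) - 1) = ((lis.length - 1 : Nat) : Int) by omega]
    rw [bwd_loop lis s (lis.length - 1) hs (by omega)]
    simp only
    rw [show lis.length - 1 + 1 = lis.length by omega]
    rw [List.take_of_length_le (by rw [List.length_reverse, List.length_rotate])]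
    rw [slice_from_rev lis s hs, slice_to_rev lis s hs]
    simp only [Option.getD_some]
    rw [List.rotate_eq_drop_append_take (by omega : s + 1 ≤ lis.length), List.reverse_append]
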